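-- pv_equiv track=rewrite | github.com/blzzua/codewars | 6-kyu/simple_fun_180_repeat_adjacent.py | repeat_adjacent
-- ===== SOURCE A (Python) =====
-- from itertools import groupby
--
-- def repeat_adjacent(string):
--     groups= [len([*content])>1 for g, content in groupby(string)]
--     bg = 0
--     inbg = False
--     for a,b in zip(groups, groups[1:]):
--         if b and a:
--             if not inbg:
--                 bg += 1
--                 inbg = True
--         if a and not b and inbg:
--             inbg = False
--     return bg
-- ===== SOURCE B (Python) =====
-- from itertools import groupby
--
-- def repeat_adjacent(string):
--     flags = [len(list(content)) > 1 for _, content in groupby(string)]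
--     return sum(1 for v, grp in groupby(flags) if v and len(list(grp)) >= 2)
-- ===== Notes on version B (the rewrite author's own statement) =====
-- stated objective: simpler
-- what changed: Replaces the pairwise zip state machine (bg/inbg flags) with a second groupby pass over the boolean flag list, counting maximal True-runs of length >= 2 in one declarative sum.
import Mathlib
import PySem

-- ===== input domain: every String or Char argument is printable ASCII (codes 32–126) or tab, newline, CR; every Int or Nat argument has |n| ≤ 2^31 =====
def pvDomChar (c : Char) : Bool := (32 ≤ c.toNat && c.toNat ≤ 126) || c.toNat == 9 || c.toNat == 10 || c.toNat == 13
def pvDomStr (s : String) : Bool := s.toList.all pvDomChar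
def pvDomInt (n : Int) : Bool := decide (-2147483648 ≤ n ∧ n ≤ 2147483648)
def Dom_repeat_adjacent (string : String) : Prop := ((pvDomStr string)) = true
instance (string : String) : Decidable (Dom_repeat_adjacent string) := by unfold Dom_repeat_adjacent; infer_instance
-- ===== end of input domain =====

-- B replaces A's pairwise zip(flags, flags[1:]) state machine by a second groupby
-- pass over the flags, counting the maximal True-runs of length >= 2 (objective: simpler).

-- shared helper: itertools.groupby as run-length groups (value, length of the group),
-- exact for the uses here (each group is only inspected through its value and length)
def pyGroupRuns {α : Type} [DecidableEq α] (xs : List α) : List (α × Nat) :=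
  xs.foldr
    (fun x acc =>
      match acc with
      | (y, n) :: r => if x = y then (y, n + 1) :: r else (x, 1) :: (y, n) :: r
      | [] => [(x, 1)])
    []

-- ===== PORT A =====
-- one step of A's for-loop over zip(groups, groups[1:]) with state (bg, inbg)
def raStep (s : Int × Bool) (ab : Bool × Bool) : Int × Bool :=
  let s1 := if ab.2 && ab.1 then
              (if !s.2 then (s.1 + 1, true) else s)
            else s
  if ab.1 && !ab.2 && s1.2 then (s1.1, false) else s1

def repeat_adjacent (string : String) : Int :=
  -- groups = [len([*content])>1 for g, content in groupby(string)]
  let groups := (pyGroupRuns string.toList).map (fun p => decide (1 < p.2))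
  -- zip(groups, groups[1:]) : groups[1:] of a list is its tail
  (List.foldl raStep (0, false) (groups.zip groups.tail)).1

-- ===== PORT B =====
def repeat_adjacent_alt (string : String) : Int :=
  -- flags = [len(list(content)) > 1 for _, content in groupby(string)]
  let flags := (pyGroupRuns string.toList).map (fun p => decide (1 < p.2))
  -- sum(1 for v, grp in groupby(flags) if v and len(list(grp)) >= 2)
  (((pyGroupRuns flags).filter (fun p => p.1 && decide (2 ≤ p.2))).length : Int)

-- ===== PRECONDITION & SPEC =====
def Spec_repeat_adjacent (string : String) (out : Int) : Prop := out = repeat_adjacent_alt string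
instance (string : String) (out : Int) : Decidable (Spec_repeat_adjacent string out) := by unfold Spec_repeat_adjacent; infer_instance

-- ===== CLAIM (what is proved, stated in full; the proofs are below) =====
def Claim_equal_repeat_adjacent : Prop := ∀ (string : String), Dom_repeat_adjacent string → Spec_repeat_adjacent string (repeat_adjacent string)

-- ===== LEMMAS AND PROOFS =====

-- A's loop as a function of an arbitrary starting state
def Gloop (bg : Int) (inbg : Bool) (f : List Bool) : Int :=
  (List.foldl raStep (bg, inbg) (f.zip f.tail)).1

-- B's count as a function of the flag list
def Bcount (f : List Bool) : Int :=
  (((pyGroupRuns f).filter (fun p => p.1 && decide (2 ≤ p.2))).length : Int)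

lemma pyGroupRuns_cons {α : Type} [DecidableEq α] (x : α) (t : List α) :
    pyGroupRuns (x :: t)
      = match pyGroupRuns t with
        | (y, n) :: r => if x = y then (y, n + 1) :: r else (x, 1) :: (y, n) :: r
        | [] => [(x, 1)] := rfl

lemma pyGroupRuns_cons_head {α : Type} [DecidableEq α] (x : α) (t : List α) :
    ∃ n r, pyGroupRuns (x :: t) = (x, n + 1) :: r := by
  rw [pyGroupRuns_cons]
  match h : pyGroupRuns t with
  | [] => exact ⟨0, [], rfl⟩
  | (y, n) :: r =>
    by_cases hx : x = y
    · subst hx; exact ⟨n, r, by simp⟩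
    · exact ⟨0, (y, n) :: r, by simp [hx]⟩

lemma pyGroupRuns_true_cons (t : List Bool) :
    pyGroupRuns (true :: t)
      = (true, (t.takeWhile id).length + 1) :: pyGroupRuns (t.dropWhile id) := by
  induction t with
  | nil => rfl
  | cons x t ih =>
    cases x with
    | false =>
      obtain ⟨n, r, h⟩ := pyGroupRuns_cons_head false t
      rw [pyGroupRuns_cons, h]
      simp [List.takeWhile, List.dropWhile, h]
    | true =>
      rw [pyGroupRuns_cons, ih]
      simp [List.takeWhile, List.dropWhile]

lemma Bcount_false_cons (t : List Bool) : Bcount (false :: t) = Bcount t := by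
  unfold Bcount
  rw [pyGroupRuns_cons]
  match h : pyGroupRuns t with
  | [] => simp
  | (false, n) :: r => simp [List.filter]
  | (true, n) :: r => simp [List.filter]

lemma Bcount_tf_cons (t : List Bool) : Bcount (true :: false :: t) = Bcount t := by
  have h := pyGroupRuns_true_cons (false :: t)
  unfold Bcount
  rw [h]
  simp only [List.takeWhile, List.dropWhile, id]
  have := Bcount_false_cons t
  unfold Bcount at this
  simpa [List.filter] using this

lemma Bcount_tt_cons (t : List Bool) :
    Bcount (true :: true :: t) = 1 + Bcount (t.dropWhile id) := by
  have h := pyGroupRuns_true_cons (true :: t)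
  unfold Bcount
  rw [h]
  simp [List.takeWhile, List.dropWhile, List.filter]
  omega

lemma raStep_falseFst (bg : Int) (y : Bool) : raStep (bg, false) (false, y) = (bg, false) := by
  simp [raStep]

lemma raStep_tf (bg : Int) : raStep (bg, false) (true, false) = (bg, false) := rfl

lemma raStep_tt (bg : Int) : raStep (bg, false) (true, true) = (bg + 1, true) := rfl

lemma raStep_in_tt (bg : Int) : raStep (bg, true) (true, true) = (bg, true) := rfl

lemma raStep_in_tf (bg : Int) : raStep (bg, true) (true, false) = (bg, false) := rfl

lemma Gloop_cons₂ (bg : Int) (inbg : Bool) (x y : Bool) (t : List Bool) :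
    Gloop bg inbg (x :: y :: t)
      = Gloop (raStep (bg, inbg) (x, y)).1 (raStep (bg, inbg) (x, y)).2 (y :: t) := rfl

lemma Gloop_false_cons (bg : Int) (t : List Bool) :
    Gloop bg false (false :: t) = Gloop bg false t := by
  cases t with
  | nil => rfl
  | cons y t' => rw [Gloop_cons₂, raStep_falseFst]

lemma Gloop_inbg_true (bg : Int) (t : List Bool) :
    Gloop bg true (true :: t) = Gloop bg false (t.dropWhile id) := by
  induction t generalizing bg with
  | nil => rfl
  | cons x t ih =>
    cases x with
    | true =>
      rw [Gloop_cons₂, raStep_in_tt]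
      simpa [List.dropWhile] using ih bg
    | false =>
      rw [Gloop_cons₂, raStep_in_tf]
      simp [List.dropWhile]

lemma Gloop_eq_Bcount (f : List Bool) (bg : Int) :
    Gloop bg false f = bg + Bcount f := by
  match f with
  | [] => simp [Gloop, Bcount, pyGroupRuns]
  | false :: t =>
    rw [Gloop_false_cons, Gloop_eq_Bcount t bg, Bcount_false_cons]
  | [true] => simp [Gloop, Bcount, pyGroupRuns, List.filter]
  | true :: false :: t =>
    rw [Gloop_cons₂, raStep_tf, Gloop_false_cons, Gloop_eq_Bcount t bg, Bcount_tf_cons]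
  | true :: true :: t =>
    rw [Gloop_cons₂, raStep_tt, Gloop_inbg_true, Gloop_eq_Bcount (t.dropWhile id) (bg + 1),
      Bcount_tt_cons]
    ring
termination_by f.length
decreasing_by
  · simp
  · simp
  · have := List.length_dropWhile_le id t
    simp; omega

-- ===== VERDICT (by name: the statement is the Claim_ definition above) =====
theorem repeat_adjacent_spec : Claim_equal_repeat_adjacent := by
  intro s _
  show repeat_adjacent s = repeat_adjacent_alt s
  have h := Gloop_eq_Bcount ((pyGroupRuns s.toList).map (fun p => decide (1 < p.2))) 0
  simpa [repeat_adjacent, repeat_adjacent_alt, Gloop, Bcount] using h
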